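-- pv_equiv track=rewrite | github.com/rootsdev/nama | src/data/prepare.py | _merge_prefixes
-- ===== SOURCE A (Python) =====
-- from typing import List, Dict, Tuple, Set
--
-- def _merge_prefixes(beginning_prefixes: Set[str], anywhere_prefixes: Set[str], name_pieces: List[str]) -> List[str]:
--     prefixes = []
--     pieces = []
--     for ix, piece in enumerate(name_pieces):
--         if (ix == 0 and piece in beginning_prefixes) or (piece in anywhere_prefixes):
--             prefixes.append(piece)
--         else:
--             if len(prefixes) > 0:
--                 piece = "".join(prefixes) + piece
--                 prefixes = []
--             pieces.append(piece)
--     if len(prefixes) > 0: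
--         piece = "".join(prefixes)
--         pieces.append(piece)
--     return pieces
-- ===== SOURCE B (Python) =====
-- def _merge_prefixes(beginning_prefixes, anywhere_prefixes, name_pieces):
--     # pass 1: prefix flags (index 0 also honours beginning_prefixes)
--     flags = [p in anywhere_prefixes for p in name_pieces]
--     if name_pieces and name_pieces[0] in beginning_prefixes:
--         flags[0] = True
--     # pass 2: right-to-left fold; a prefix piece glues onto the piece
--     # emitted just after it, or stands alone if nothing follows
--     rev = []
--     for piece, flag in zip(reversed(name_pieces), reversed(flags)):
--         if not flag:
--             rev.append(piece)
--         elif rev: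
--             rev[-1] = piece + rev[-1]
--         else:
--             rev.append(piece)
--     rev.reverse()
--     return rev
-- ===== Notes on version B (the rewrite author's own statement) =====
-- stated objective: alternative
-- what changed: Replaced the single forward loop carrying a pending-prefix accumulator and a final flush by two passes: a flag-computation pass plus a right-to-left fold that glues each prefix piece onto the head of the already-grouped tail.
import Mathlib
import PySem

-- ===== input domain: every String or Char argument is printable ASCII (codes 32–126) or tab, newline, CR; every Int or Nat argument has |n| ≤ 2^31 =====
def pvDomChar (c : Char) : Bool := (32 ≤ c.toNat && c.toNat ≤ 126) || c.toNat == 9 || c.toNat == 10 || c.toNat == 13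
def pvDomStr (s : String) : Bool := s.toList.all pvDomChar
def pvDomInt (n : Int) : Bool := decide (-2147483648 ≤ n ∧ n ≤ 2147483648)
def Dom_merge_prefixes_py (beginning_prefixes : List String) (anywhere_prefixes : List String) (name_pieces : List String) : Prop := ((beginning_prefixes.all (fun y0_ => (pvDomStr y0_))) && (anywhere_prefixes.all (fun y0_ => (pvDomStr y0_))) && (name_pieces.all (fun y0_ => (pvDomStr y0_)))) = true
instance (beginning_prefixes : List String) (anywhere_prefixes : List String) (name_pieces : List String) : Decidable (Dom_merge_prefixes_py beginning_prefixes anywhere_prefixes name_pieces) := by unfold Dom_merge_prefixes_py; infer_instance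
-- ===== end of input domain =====

-- B replaces A's accumulator loop by a flag pass plus a right-recursive grouping pass (alternative decomposition, same cost).

-- ===== PORT A =====
-- the for-loop of A, state = (prefixes, pieces), ix is the enumerate counter
def aLoop (bp ap : List String) : Nat → List String → List String × List String → List String × List String
  | _, [], st => st
  | ix, piece :: rest, (prefixes, pieces) =>
    if (ix == 0 && bp.contains piece) || ap.contains piece then
      aLoop bp ap (ix + 1) rest (prefixes ++ [piece], pieces)
    else
      if prefixes.length > 0 then
        aLoop bp ap (ix + 1) rest ([], pieces ++ [String.join prefixes ++ piece])
      else
        aLoop bp ap (ix + 1) rest (prefixes, pieces ++ [piece])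

def merge_prefixes_py (beginning_prefixes : List String) (anywhere_prefixes : List String) (name_pieces : List String) : List String :=
  let st := aLoop beginning_prefixes anywhere_prefixes 0 name_pieces ([], [])
  if st.1.length > 0 then st.2 ++ [String.join st.1] else st.2

-- ===== PORT B =====
-- Source B's right-to-left loop body: glue a prefix piece onto the head of the grouped tail
def altStep (pf : String × Bool) (rest : List String) : List String :=
  if !pf.2 then pf.1 :: rest
  else match rest with
    | r :: rs => (pf.1 ++ r) :: rs
    | [] => [pf.1]

-- Source B's reversed loop building `rev` is a right fold over the (piece, flag) pairs
def altGroup (l : List (String × Bool)) : List String := l.foldr altStep []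

def merge_prefixes_py_alt (beginning_prefixes : List String) (anywhere_prefixes : List String) (name_pieces : List String) : List String :=
  let flags : List Bool :=
    match name_pieces with
    | [] => []
    | p :: ps =>
      (if beginning_prefixes.contains p then true else anywhere_prefixes.contains p)
        :: ps.map (fun q => anywhere_prefixes.contains q)
  altGroup (name_pieces.zip flags)

-- ===== PRECONDITION & SPEC =====
def Spec_merge_prefixes_py (beginning_prefixes : List String) (anywhere_prefixes : List String) (name_pieces : List String) (out : List String) : Prop := out = merge_prefixes_py_alt beginning_prefixes anywhere_prefixes name_pieces
instance (beginning_prefixes : List String) (anywhere_prefixes : List String) (name_pieces : List String) (out : List String) : Decidable (Spec_merge_prefixes_py beginning_prefixes anywhere_prefixes name_pieces out) := by unfold Spec_merge_prefixes_py; infer_instance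

-- ===== CLAIM (what is proved, stated in full; the proofs are below) =====
def Claim_equal_merge_prefixes_py : Prop := ∀ (beginning_prefixes : List String) (anywhere_prefixes : List String) (name_pieces : List String), Dom_merge_prefixes_py beginning_prefixes anywhere_prefixes name_pieces → Spec_merge_prefixes_py beginning_prefixes anywhere_prefixes name_pieces (merge_prefixes_py beginning_prefixes anywhere_prefixes name_pieces)

-- ===== LEMMAS AND PROOFS =====

-- the final flush of A's loop state
def aFinish (st : List String × List String) : List String :=
  if st.1.length > 0 then st.2 ++ [String.join st.1] else st.2

-- gluing a pending prefix group onto the front of an already-grouped tail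
def glue (pref : List String) (l : List String) : List String :=
  if pref = [] then l
  else match l with
    | [] => [String.join pref]
    | r :: rs => (String.join pref ++ r) :: rs

theorem join_append_single (l : List String) (s : String) :
    String.join (l ++ [s]) = String.join l ++ s := by
  simp [String.join, List.foldl_append]

theorem glue_snoc (pref : List String) (piece : String) (l : List String) :
    glue (pref ++ [piece]) l =
    glue pref (match l with | r :: rs => (piece ++ r) :: rs | [] => [piece]) := by
  cases l with
  | nil =>
    cases pref with
    | nil => simp [glue, String.join]
    | cons a as =>
      rw [glue, glue, if_neg (by simp), if_neg (by simp), join_append_single]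
  | cons r rs =>
    cases pref with
    | nil => simp [glue, String.join]
    | cons a as =>
      rw [glue, glue, if_neg (by simp), if_neg (by simp), join_append_single,
        String.append_assoc]

theorem aLoop_glue (bp ap : List String) (rest : List String) :
    ∀ (n : Nat) (pref pieces : List String),
    aFinish (aLoop bp ap (n + 1) rest (pref, pieces)) =
      pieces ++ glue pref (altGroup (rest.zip (rest.map (fun q => ap.contains q)))) := by
  induction rest with
  | nil =>
    intro n pref pieces
    cases pref with
    | nil => simp [aLoop, aFinish, glue, altGroup]
    | cons a as => simp [aLoop, aFinish, glue, altGroup]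
  | cons piece rest ih =>
    intro n pref pieces
    by_cases hm : piece ∈ ap
    · have : aLoop bp ap (n + 1) (piece :: rest) (pref, pieces) =
          aLoop bp ap (n + 2) rest (pref ++ [piece], pieces) := by
        simp [aLoop, hm]
      rw [this, ih (n + 1)]
      simp [altGroup, altStep, hm, glue_snoc]
    · cases pref with
      | nil =>
        have : aLoop bp ap (n + 1) (piece :: rest) ([], pieces) =
            aLoop bp ap (n + 2) rest ([], pieces ++ [piece]) := by
          simp [aLoop, hm]
        rw [this, ih (n + 1)]
        simp [altGroup, altStep, hm, glue]
      | cons a as =>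
        have : aLoop bp ap (n + 1) (piece :: rest) (a :: as, pieces) =
            aLoop bp ap (n + 2) rest ([], pieces ++ [String.join (a :: as) ++ piece]) := by
          simp [aLoop, hm]
        rw [this, ih (n + 1)]
        simp [altGroup, altStep, hm, glue]

-- ===== VERDICT (by name: the statement is the Claim_ definition above) =====
theorem merge_prefixes_py_spec : Claim_equal_merge_prefixes_py := by
  intro bp ap np _
  unfold Spec_merge_prefixes_py merge_prefixes_py merge_prefixes_py_alt
  cases np with
  | nil => simp [aLoop, altGroup]
  | cons p ps =>
    by_cases hf : p ∈ bp ∨ p ∈ ap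
    · have : aLoop bp ap 0 (p :: ps) ([], []) = aLoop bp ap 1 ps ([p], []) := by
        rcases hf with h | h <;> simp [aLoop, h]
      show aFinish (aLoop bp ap 0 (p :: ps) ([], [])) = _
      rw [this, aLoop_glue bp ap ps 0]
      have hflag : ¬ (p ∉ bp ∧ p ∉ ap) := by tauto
      simp [altGroup, altStep, glue, String.join, hflag]
      cases List.foldr altStep [] (ps.zip (List.map (fun q => decide (q ∈ ap)) ps)) <;> rfl
    · have h1 : p ∉ bp := fun h => hf (Or.inl h)
      have h2 : p ∉ ap := fun h => hf (Or.inr h)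
      have : aLoop bp ap 0 (p :: ps) ([], []) = aLoop bp ap 1 ps ([], [p]) := by
        simp [aLoop, h1, h2]
      show aFinish (aLoop bp ap 0 (p :: ps) ([], [])) = _
      rw [this, aLoop_glue bp ap ps 0]
      simp [altGroup, altStep, h1, h2, glue]
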